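-- pv_equiv track=rewrite | github.com/jeno8522/Coding-Test-Study | 9월/3주차/프로그래머스/라인 1번.py | solution
-- ===== SOURCE A (Python) =====
-- from typing import List
-- from collections import defaultdict
--
-- def solution(queries: List[List[int]]) -> int:
--     answer = 0
--     stored_cnt = defaultdict(int)  #2의 거듭제곱
--     elem_cnt = defaultdict(int)
--     arr_len = defaultdict(int)
--     cnt = 0
--
--     for i in range(len(queries)):
--         idx = queries[i][0]
--         num = queries[i][1]
--         n = 1
--
--         elem_cnt[idx] += num
--         if arr_len[idx] == 0:
--             stored_cnt[idx] += num
--             while True: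
--                 if elem_cnt[idx] <= n:
--                     arr_len[idx] = n
--                     break
--                 n *= 2
--         elif num > arr_len[idx] - stored_cnt[idx]:
--             cnt += stored_cnt[idx]
--             while True:
--                 if elem_cnt[idx] <= n:
--                     arr_len[idx] = n
--                     break
--                 n *= 2
--             stored_cnt[idx] += num
--         elif num <= arr_len[idx] - stored_cnt[idx]:
--             stored_cnt[idx] += num
--     answer = cnt
--     return answer
-- ===== SOURCE B (Python) =====
-- from typing import List
--
--
-- def _ceil_pow2(v: int) -> int:
--     # smallest power of two >= v, with a floor of 1 (v <= 1 -> 1)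
--     if v <= 1:
--         return 1
--     return 1 << (v - 1).bit_length()
--
--
-- def solution(queries: List[List[int]]) -> int:
--     # Closed form instead of a capacity state machine: for each index the array
--     # capacity after j queries equals _ceil_pow2(max of the first j prefix sums),
--     # so a counted resize happens at query j (j >= 1) exactly when the j-th prefix
--     # sum exceeds _ceil_pow2 of the running max so far, and it contributes the
--     # previous prefix sum.
--     groups = {}
--     for q in queries:
--         groups.setdefault(q[0], []).append(q[1])
--     answer = 0
--     for nums in groups.values():
--         prefixes = []
--         s = 0
--         for x in nums:
--             s += x
--             prefixes.append(s)
--         maxes = []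
--         m = None
--         for p in prefixes:
--             m = p if m is None or p > m else m
--             maxes.append(m)
--         answer += sum(pprev
--                       for (pprev, mprev), p in zip(zip(prefixes, maxes), prefixes[1:])
--                       if p > _ceil_pow2(mprev))
--     return answer
-- ===== Notes on version B (the rewrite author's own statement) =====
-- stated objective: alternative
-- what changed: B replaces A's online capacity state machine (three interleaved defaultdicts and a doubling while-loop) by a closed-form criterion: after grouping queries per index it computes the list of prefix sums and the list of their running maxima, using the fact that the capacity after j queries is exactly the next power of two above the running maximum of the prefix sums, so the answer is the sum of the previous prefix sum over positions where the current prefix sum exceeds that bound.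
import Mathlib
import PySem

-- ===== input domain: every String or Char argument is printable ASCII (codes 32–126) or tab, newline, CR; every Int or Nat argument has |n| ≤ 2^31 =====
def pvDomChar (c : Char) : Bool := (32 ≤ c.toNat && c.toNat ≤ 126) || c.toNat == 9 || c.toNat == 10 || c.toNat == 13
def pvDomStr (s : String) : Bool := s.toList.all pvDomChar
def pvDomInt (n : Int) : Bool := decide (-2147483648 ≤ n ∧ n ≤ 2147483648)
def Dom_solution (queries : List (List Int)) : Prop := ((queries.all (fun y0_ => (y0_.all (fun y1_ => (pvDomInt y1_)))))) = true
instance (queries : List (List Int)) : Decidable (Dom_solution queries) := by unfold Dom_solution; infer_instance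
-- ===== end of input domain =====

-- B replaces A's online capacity state machine (three interleaved defaultdicts and a
-- doubling while-loop) by a closed-form criterion over prefix sums and their running
-- maxima computed per index; objective: alternative (same asymptotic cost).

-- ===== PORT A =====
-- A's inner `while True: ... n *= 2` loop; n is always the power 2^k (n starts at 1, k = 0).
def powLoopA (e : Int) (k : Nat) : Int :=
  if e ≤ 2 ^ k then 2 ^ k else powLoopA e (k + 1)
termination_by (e - 2 ^ k).toNat
decreasing_by
  have h1 : (0:Int) < 2 ^ k := pow_pos (by norm_num) k
  omega

-- one iteration of A's `for i in range(len(queries))` body; state = (stored_cnt, elem_cnt, arr_len, cnt).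
-- defaultdict reads are ported as getD _ 0 (a defaultdict __getitem__ also inserts the default,
-- which never changes any value subsequently read, so getD is value-faithful).
def solStepA (st : PySem.Dict Int Int × PySem.Dict Int Int × PySem.Dict Int Int × Int)
    (q : List Int) : PySem.Dict Int Int × PySem.Dict Int Int × PySem.Dict Int Int × Int :=
  match st with
  | (stored, elem, arrLen, cnt) =>
    let idx := PySem.List.pyGetD q 0 0
    let num := PySem.List.pyGetD q 1 0
    let elem' := elem.modify idx 0 (· + num)
    if arrLen.getD idx 0 = 0 then
      (stored.modify idx 0 (· + num), elem', arrLen.insert idx (powLoopA (elem'.getD idx 0) 0), cnt)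
    else if num > arrLen.getD idx 0 - stored.getD idx 0 then
      (stored.modify idx 0 (· + num), elem', arrLen.insert idx (powLoopA (elem'.getD idx 0) 0),
        cnt + stored.getD idx 0)
    else if num ≤ arrLen.getD idx 0 - stored.getD idx 0 then
      (stored.modify idx 0 (· + num), elem', arrLen, cnt)
    else
      (stored, elem', arrLen, cnt)

def solution (queries : List (List Int)) : Int :=
  ((PySem.List.pyRange 0 (PySem.List.len queries)).foldl
      (fun st i => solStepA st (PySem.List.pyGetD queries i []))
      (PySem.Dict.empty, PySem.Dict.empty, PySem.Dict.empty, (0:Int))).2.2.2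

-- ===== PORT B =====
-- smallest power of two ≥ v with a floor of 1, via bit_length (Source B's _ceil_pow2)
def ceilPow2 (v : Int) : Int :=
  if v ≤ 1 then 1 else 1 <<< PySem.Int.bitLength (v - 1)

-- Source B's per-list body: prefix-sum pass, running-max pass, then the filtered zip sum
def perList (nums : List Int) : Int :=
  let prefixes :=
    (nums.foldl (fun st x => (st.1 ++ [st.2 + x], st.2 + x)) (([] : List Int), (0 : Int))).1
  let maxes :=
    (prefixes.foldl
      (fun st p =>
        let m := match st.2 with
          | none => p
          | some m => if p > m then p else m
        (st.1 ++ [m], some m))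
      (([] : List Int), (none : Option Int))).1
  -- sum(pprev for (pprev, mprev), p in zip(zip(prefixes, maxes), prefixes[1:]) if p > _ceil_pow2(mprev))
  (((prefixes.zip maxes).zip (PySem.List.slice prefixes (some 1) none)).foldl
    (fun acc t => if t.2 > ceilPow2 t.1.2 then acc + t.1.1 else acc) 0)

def solution_alt (queries : List (List Int)) : Int :=
  let groups : PySem.Dict Int (List Int) :=
    queries.foldl
      (fun d q => d.modify (PySem.List.pyGetD q 0 0) [] (· ++ [PySem.List.pyGetD q 1 0]))
      PySem.Dict.empty
  groups.values.foldl (fun answer nums => answer + perList nums) 0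

-- ===== PRECONDITION & SPEC =====
-- Pre_ excludes exactly the queries with fewer than two entries, on which the Python A
-- raises IndexError at queries[i][0] / queries[i][1] (and B raises likewise).
def Pre_solution (queries : List (List Int)) : Prop := ∀ q ∈ queries, 2 ≤ q.length
instance (queries : List (List Int)) : Decidable (Pre_solution queries) := by
  unfold Pre_solution; infer_instance

def pvWitness_solution : List (List Int) := [[0, 1], [0, 3], [1, 2], [0, 2]]

def Spec_solution (queries : List (List Int)) (out : Int) : Prop := out = solution_alt queries
instance (queries : List (List Int)) (out : Int) : Decidable (Spec_solution queries out) := by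
  unfold Spec_solution; infer_instance

-- ===== CLAIM (what is proved, stated in full; the proofs are below) =====
def Claim_equal_solution : Prop :=
  ∀ (queries : List (List Int)), Dom_solution queries → Pre_solution queries →
    Spec_solution queries (solution queries)

-- ===== LEMMAS AND PROOFS =====

def keyOf (q : List Int) : Int := PySem.List.pyGetD q 0 0
def valOf (q : List Int) : Int := PySem.List.pyGetD q 1 0
def numsOf (k : Int) (qs : List (List Int)) : List Int :=
  (qs.filter (fun q => keyOf q == k)).map valOf
def keysOf (qs : List (List Int)) : List Int := PySem.Set.ofList (qs.map keyOf)

-- contribution to cnt of A's per-index state machine started at (stored, elem, arrLen)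
def simA (s e a : Int) : List Int → Int
  | [] => 0
  | num :: rest =>
    let e' := e + num
    if a = 0 then simA (s + num) e' (powLoopA e' 0) rest
    else if num > a - s then s + simA (s + num) e' (powLoopA e' 0) rest
    else if num ≤ a - s then simA (s + num) e' a rest
    else simA s e' a rest

-- specification scans: prefix sums from s, running maxima from m
def scanSum (s : Int) : List Int → List Int
  | [] => []
  | x :: r => (s + x) :: scanSum (s + x) r

def scanMax (m : Int) : List Int → List Int
  | [] => []
  | p :: r => (max m p) :: scanMax (max m p) r

-- the closed-form count: current prefix P, running max M of all prefixes so far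
def g (P M : Int) : List Int → Int
  | [] => 0
  | x :: r => (if P + x > ceilPow2 M then P else 0) + g (P + x) (max M (P + x)) r

lemma powLoopA_eq_of (t : Int) :
    ∀ (d k : Nat), t ≤ 2 ^ (k + d) → (∀ j, k ≤ j → j < k + d → 2 ^ j < t) →
      powLoopA t k = 2 ^ (k + d) := by
  intro d
  induction d with
  | zero =>
    intro k h _
    rw [powLoopA, if_pos (by simpa using h)]
    simp
  | succ d ih =>
    intro k h hall
    have hk : (2:Int) ^ k < t := hall k le_rfl (by omega)
    rw [powLoopA, if_neg (by omega)]
    have he : k + (d + 1) = (k + 1) + d := by omega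
    rw [he] at h ⊢
    exact ih (k + 1) h (fun j hj1 hj2 => hall j (by omega) (by omega))

lemma bitLength_unique (n : Int) (k : Nat) (hk : 1 ≤ k)
    (h1 : 2 ^ (k - 1) ≤ n.natAbs) (h2 : n.natAbs < 2 ^ k) :
    PySem.Int.bitLength n = k := by
  have hne : n ≠ 0 := by
    intro h0
    rw [h0] at h1
    simp only [Int.natAbs_zero] at h1
    have h2p : 1 ≤ 2 ^ (k - 1) := Nat.one_le_two_pow
    omega
  have hlt : n.natAbs < 2 ^ PySem.Int.bitLength n := PySem.Int.lt_two_pow_bitLength n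
  have hle : 2 ^ (PySem.Int.bitLength n - 1) ≤ n.natAbs := PySem.Int.two_pow_bitLength_le n hne
  by_contra hne2
  rcases Nat.lt_or_ge (PySem.Int.bitLength n) k with h | h
  · have : (2:Nat) ^ PySem.Int.bitLength n ≤ 2 ^ (k - 1) :=
      Nat.pow_le_pow_right (by norm_num) (by omega)
    omega
  · have hgt : k < PySem.Int.bitLength n := by omega
    have : (2:Nat) ^ k ≤ 2 ^ (PySem.Int.bitLength n - 1) :=
      Nat.pow_le_pow_right (by norm_num) (by omega)
    omega

lemma ceilPow2_eq_pow (v : Int) (h : ¬ v ≤ 1) :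
    ceilPow2 v = ((2:Int)) ^ PySem.Int.bitLength (v - 1) := by
  rw [ceilPow2, if_neg h, Nat.one_shiftLeft]
  push_cast
  ring

lemma ceilPow2_pos (v : Int) : 1 ≤ ceilPow2 v := by
  by_cases h : v ≤ 1
  · rw [ceilPow2, if_pos h]
  · rw [ceilPow2_eq_pow v h]
    exact one_le_pow₀ (by norm_num)

lemma le_ceilPow2 (v : Int) : v ≤ ceilPow2 v := by
  by_cases h : v ≤ 1
  · rw [ceilPow2, if_pos h]; omega
  · rw [ceilPow2_eq_pow v h]
    have habs : ((v - 1).natAbs : Int) = v - 1 := Int.natAbs_of_nonneg (by omega)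
    have hlt : (v - 1).natAbs < 2 ^ PySem.Int.bitLength (v - 1) :=
      PySem.Int.lt_two_pow_bitLength (v - 1)
    have hc : ((v - 1).natAbs : Int) < ((2 ^ PySem.Int.bitLength (v - 1) : Nat) : Int) := by
      exact_mod_cast hlt
    rw [habs] at hc
    push_cast at hc
    omega

lemma ceilPow2_stable (M v : Int) (h1 : M < v) (h2 : v ≤ ceilPow2 M) :
    ceilPow2 v = ceilPow2 M := by
  by_cases hM : M ≤ 1
  · rw [ceilPow2, if_pos hM] at h2
    simp only [ceilPow2]
    rw [if_pos (show v ≤ 1 by omega), if_pos hM]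
  · have k := PySem.Int.bitLength (M - 1)
    have hMne : M - 1 ≠ 0 := by omega
    have habsM : ((M - 1).natAbs : Int) = M - 1 := Int.natAbs_of_nonneg (by omega)
    have hltM : (M - 1).natAbs < 2 ^ PySem.Int.bitLength (M - 1) :=
      PySem.Int.lt_two_pow_bitLength (M - 1)
    have hleM : 2 ^ (PySem.Int.bitLength (M - 1) - 1) ≤ (M - 1).natAbs :=
      PySem.Int.two_pow_bitLength_le (M - 1) hMne
    have hk1 : 1 ≤ PySem.Int.bitLength (M - 1) := by
      by_contra h0
      have : PySem.Int.bitLength (M - 1) = 0 := by omega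
      rw [this] at hltM
      simp at hltM
      omega
    rw [ceilPow2_eq_pow M hM] at h2 ⊢
    have hv1 : ¬ v ≤ 1 := by omega
    rw [ceilPow2_eq_pow v hv1]
    have habsv : ((v - 1).natAbs : Int) = v - 1 := Int.natAbs_of_nonneg (by omega)
    have hbound : ((2:Int)) ^ PySem.Int.bitLength (M - 1)
        = (((2:Nat) ^ PySem.Int.bitLength (M - 1) : Nat) : Int) := by push_cast; ring
    have hvub : (v - 1).natAbs < 2 ^ PySem.Int.bitLength (M - 1) := by
      have : (v - 1 : Int) < (((2:Nat) ^ PySem.Int.bitLength (M - 1) : Nat) : Int) := by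
        rw [← hbound]; omega
      omega
    have hvlb : 2 ^ (PySem.Int.bitLength (M - 1) - 1) ≤ (v - 1).natAbs := by
      have hMv : (M - 1).natAbs < (v - 1).natAbs := by omega
      omega
    rw [bitLength_unique (v - 1) (PySem.Int.bitLength (M - 1)) hk1 hvlb hvub]

lemma powLoopA_eq_ceilPow2 (e : Int) : powLoopA e 0 = ceilPow2 e := by
  by_cases h1 : e ≤ 1
  · rw [powLoopA, if_pos (by simpa using h1)]
    simp [ceilPow2, h1]
  · rw [not_le] at h1
    have hne : e - 1 ≠ 0 := by omega
    have habs : ((e - 1).natAbs : Int) = e - 1 := Int.natAbs_of_nonneg (by omega)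
    have hlt : (e - 1).natAbs < 2 ^ PySem.Int.bitLength (e - 1) :=
      PySem.Int.lt_two_pow_bitLength (e - 1)
    have hle : 2 ^ (PySem.Int.bitLength (e - 1) - 1) ≤ (e - 1).natAbs :=
      PySem.Int.two_pow_bitLength_le (e - 1) hne
    have hb1 : 1 ≤ PySem.Int.bitLength (e - 1) := by
      rcases Nat.eq_zero_or_pos (PySem.Int.bitLength (e - 1)) with h0 | h0
      · rw [h0] at hlt
        simp at hlt
        omega
      · omega
    have hup : e ≤ 2 ^ PySem.Int.bitLength (e - 1) := by
      have hc : ((e - 1).natAbs : Int) < ((2 ^ PySem.Int.bitLength (e - 1) : Nat) : Int) := by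
        exact_mod_cast hlt
      rw [habs] at hc
      push_cast at hc
      omega
    have hlow : ∀ j : Nat, j < PySem.Int.bitLength (e - 1) → (2:Int) ^ j < e := by
      intro j hj
      have h2 : (2:Nat) ^ j ≤ 2 ^ (PySem.Int.bitLength (e - 1) - 1) :=
        Nat.pow_le_pow_right (by norm_num) (by omega)
      have hc : ((2:Nat) ^ j : Int) ≤ ((e - 1).natAbs : Int) := by exact_mod_cast le_trans h2 hle
      rw [habs] at hc
      push_cast at hc
      omega
    have hmain := powLoopA_eq_of e (PySem.Int.bitLength (e - 1)) 0
      (by simpa using hup) (fun j _ hj => by simpa using hlow j (by simpa using hj))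
    rw [hmain, ceilPow2_eq_pow e (by omega)]
    simp

-- A's per-index machine started at prefix P (= stored = elem) with capacity ceilPow2 M,
-- M the running max of the prefixes seen so far, computes the closed form g.
lemma simA_eq_g (l : List Int) : ∀ P M, simA P P (ceilPow2 M) l = g P M l := by
  induction l with
  | nil => intro P M; rfl
  | cons x r ih =>
    intro P M
    have hpos := ceilPow2_pos M
    simp only [simA, g]
    rw [if_neg (show ¬ ceilPow2 M = 0 by omega)]
    by_cases hb : x > ceilPow2 M - P
    · rw [if_pos hb, powLoopA_eq_ceilPow2, ih,
        if_pos (show P + x > ceilPow2 M by omega)]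
      have hmax : max M (P + x) = P + x := by
        have := le_ceilPow2 M
        omega
      rw [hmax]
    · have hcap : ceilPow2 (max M (P + x)) = ceilPow2 M := by
        by_cases hle : P + x ≤ M
        · rw [max_eq_left hle]
        · rw [max_eq_right (by omega)]
          exact ceilPow2_stable M (P + x) (by omega) (by omega)
      rw [if_neg hb, if_pos (show x ≤ ceilPow2 M - P by omega),
        if_neg (show ¬ P + x > ceilPow2 M by omega),
        ← ih (P + x) (max M (P + x)), hcap, zero_add]

-- B's first pass builds the prefix-sum list
lemma prefix_fold (nums : List Int) :
    ∀ (acc : List Int) (s : Int),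
      (nums.foldl (fun st x => (st.1 ++ [st.2 + x], st.2 + x)) (acc, s)).1
        = acc ++ scanSum s nums := by
  induction nums with
  | nil => intro acc s; simp [scanSum]
  | cons x r ih =>
    intro acc s
    simp only [List.foldl_cons, scanSum]
    rw [ih]
    simp

-- B's second pass builds the running-max list (after the first element the accumulator is some)
lemma max_fold_some (ps : List Int) :
    ∀ (acc : List Int) (m : Int),
      (ps.foldl
        (fun st p =>
          let mm := match st.2 with
            | none => p
            | some m => if p > m then p else m
          (st.1 ++ [mm], some mm))
        (acc, some m)).1 = acc ++ scanMax m ps := by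
  induction ps with
  | nil => intro acc m; simp [scanMax]
  | cons p r ih =>
    intro acc m
    simp only [List.foldl_cons, scanMax]
    have hm : (if p > m then p else m) = max m p := by
      by_cases h : p > m
      · rw [if_pos h, max_eq_right (by omega)]
      · rw [if_neg h, max_eq_left (by omega)]
    rw [hm, ih]
    simp

lemma max_fold (p : Int) (r : List Int) (acc : List Int) :
    ((p :: r).foldl
      (fun st q =>
        let mm := match st.2 with
          | none => q
          | some m => if q > m then q else m
        (st.1 ++ [mm], some mm))
      (acc, none)).1 = acc ++ p :: scanMax p r := by
  simp only [List.foldl_cons]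
  rw [max_fold_some]
  simp

-- B's filtered zip sum computes the closed form g
lemma zip_sum (r : List Int) :
    ∀ P M acc,
      ((((P :: scanSum P r).zip (M :: scanMax M (scanSum P r))).zip (scanSum P r)).foldl
        (fun acc t => if t.2 > ceilPow2 t.1.2 then acc + t.1.1 else acc) acc)
        = acc + g P M r := by
  induction r with
  | nil => intro P M acc; simp [scanSum, g]
  | cons x rr ih =>
    intro P M acc
    simp only [scanSum, scanMax, g, List.zip_cons_cons, List.foldl_cons]
    by_cases hb : P + x > ceilPow2 M
    · rw [if_pos hb, if_pos hb]
      have h := ih (P + x) (max M (P + x)) (acc + P)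
      simp only [List.zip_cons_cons] at h
      rw [h]
      omega
    · rw [if_neg hb, if_neg hb]
      have h := ih (P + x) (max M (P + x)) acc
      simp only [List.zip_cons_cons] at h
      rw [h]
      omega

-- per-index: Source B's staged body equals A's per-index machine from the empty state
lemma perList_eq_simA (nums : List Int) : perList nums = simA 0 0 0 nums := by
  cases nums with
  | nil => rfl
  | cons x r =>
    have h0 : (0:Int) + x = x := by omega
    simp only [perList]
    rw [prefix_fold]
    simp only [List.nil_append, scanSum, h0]
    rw [max_fold, PySem.List.slice_from_one]
    simp only [List.nil_append, List.tail_cons]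
    rw [zip_sum r x x 0]
    simp only [simA, h0, powLoopA_eq_ceilPow2, zero_add]
    exact (simA_eq_g r x x).symm

lemma keyOf_def (q : List Int) : PySem.List.pyGetD q 0 0 = keyOf q := rfl

lemma valOf_def (q : List Int) : PySem.List.pyGetD q 1 0 = valOf q := rfl

lemma nodup_keysOf (qs : List (List Int)) : (keysOf qs).Nodup := PySem.Set.nodup_ofList _

lemma mem_keysOf (qs : List (List Int)) (k : Int) : k ∈ keysOf qs ↔ k ∈ qs.map keyOf := by
  simp [keysOf, PySem.Set.mem_ofList]

lemma mem_keysOf_cons (q : List Int) (rest : List (List Int)) (k : Int) :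
    k ∈ keysOf (q :: rest) ↔ k = keyOf q ∨ k ∈ keysOf rest := by
  simp [mem_keysOf]

lemma numsOf_cons (k : Int) (q : List Int) (rest : List (List Int)) :
    numsOf k (q :: rest) = if keyOf q = k then valOf q :: numsOf k rest else numsOf k rest := by
  by_cases h : keyOf q = k
  · simp [numsOf, h]
  · simp [numsOf, h]

lemma numsOf_eq_nil_of_not_mem (qs : List (List Int)) (k : Int) (h : k ∉ keysOf qs) :
    numsOf k qs = [] := by
  rw [mem_keysOf] at h
  unfold numsOf
  rw [List.filter_eq_nil_iff.mpr, List.map_nil]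
  intro q hq
  simp only [beq_iff_eq]
  intro hk
  exact h (List.mem_map.mpr ⟨q, hq, hk⟩)

lemma sum_over_keys (G : Int → Int) (L : List Int) (hN : L.Nodup) (k0 : Int) (hk : k0 ∈ L) :
    (L.map G).sum = G k0 + ((L.filter (fun k => k ≠ k0)).map G).sum := by
  have hN2 : (k0 :: L.filter (fun k => k ≠ k0)).Nodup := by
    refine List.Nodup.cons ?_ (hN.filter _)
    simp
  have hperm : L.Perm (k0 :: L.filter (fun k => k ≠ k0)) := by
    rw [List.perm_ext_iff_of_nodup hN hN2]
    intro a
    simp only [List.mem_cons, List.mem_filter, decide_eq_true_eq]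
    constructor
    · intro ha
      by_cases h : a = k0
      · exact Or.inl h
      · exact Or.inr ⟨ha, h⟩
    · rintro (rfl | ⟨ha, _⟩)
      · exact hk
      · exact ha
  have := (hperm.map G).sum_eq
  simpa using this

lemma key_sum_step (k0 : Int) (K Kc : List Int) (hN : K.Nodup) (hNc : Kc.Nodup)
    (G G' : Int → Int) (d : Int)
    (hmem : ∀ k, k ∈ Kc ↔ k = k0 ∨ k ∈ K)
    (hne : ∀ k, k ≠ k0 → G k = G' k)
    (hk0 : G k0 = d + G' k0)
    (hz : k0 ∉ K → G' k0 = 0) :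
    (Kc.map G).sum = d + (K.map G').sum := by
  have hk0c : k0 ∈ Kc := (hmem k0).mpr (Or.inl rfl)
  rw [sum_over_keys G Kc hNc k0 hk0c]
  have hfG : (Kc.filter (fun k => k ≠ k0)).map G = (Kc.filter (fun k => k ≠ k0)).map G' := by
    apply List.map_congr_left
    intro k hkf
    have := (List.mem_filter.mp hkf).2
    simp only [decide_eq_true_eq] at this
    exact hne k this
  have hperm : (Kc.filter (fun k => k ≠ k0)).Perm (K.filter (fun k => k ≠ k0)) := by
    rw [List.perm_ext_iff_of_nodup (hNc.filter _) (hN.filter _)]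
    intro a
    simp only [List.mem_filter, decide_eq_true_eq, hmem]
    constructor
    · rintro ⟨rfl | ha, hne2⟩
      · exact absurd rfl hne2
      · exact ⟨ha, hne2⟩
    · rintro ⟨ha, hne2⟩
      exact ⟨Or.inr ha, hne2⟩
  have hsum : ((Kc.filter (fun k => k ≠ k0)).map G).sum
      = ((K.filter (fun k => k ≠ k0)).map G').sum := by
    rw [hfG]
    exact (hperm.map G').sum_eq
  rw [hsum, hk0]
  by_cases hin : k0 ∈ K
  · rw [sum_over_keys G' K hN k0 hin]
    omega
  · have hfe : K.filter (fun k => k ≠ k0) = K := by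
      apply List.filter_eq_self.mpr
      intro k hkK
      simp only [decide_eq_true_eq]
      rintro rfl
      exact hin hkK
    rw [hfe, hz hin]
    omega

lemma foldA_main (qs : List (List Int)) :
    ∀ (stored elem arrLen : PySem.Dict Int Int) (cnt : Int),
      (qs.foldl solStepA (stored, elem, arrLen, cnt)).2.2.2
        = cnt + ((keysOf qs).map (fun k =>
            simA (stored.getD k 0) (elem.getD k 0) (arrLen.getD k 0) (numsOf k qs))).sum := by
  induction qs with
  | nil => intro stored elem arrLen cnt; simp [keysOf, PySem.Set.ofList]
  | cons q rest ih =>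
    intro stored elem arrLen cnt
    rw [List.foldl_cons]
    have hEmod : ∀ k, (elem.modify (keyOf q) 0 (· + valOf q)).getD k 0
        = if k = keyOf q then elem.getD (keyOf q) 0 + valOf q else elem.getD k 0 := by
      intro k; rw [PySem.Dict.getD_modify]
    have hSmod : ∀ k, (stored.modify (keyOf q) 0 (· + valOf q)).getD k 0
        = if k = keyOf q then stored.getD (keyOf q) 0 + valOf q else stored.getD k 0 := by
      intro k; rw [PySem.Dict.getD_modify]
    have hAins : ∀ (v : Int) (k : Int), (arrLen.insert (keyOf q) v).getD k 0
        = if k = keyOf q then v else arrLen.getD k 0 := by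
      intro v k; rw [PySem.Dict.getD_insert]
    by_cases hA : arrLen.getD (keyOf q) 0 = 0
    · have hstep : solStepA (stored, elem, arrLen, cnt) q
          = (stored.modify (keyOf q) 0 (· + valOf q), elem.modify (keyOf q) 0 (· + valOf q),
             arrLen.insert (keyOf q) (powLoopA ((elem.modify (keyOf q) 0 (· + valOf q)).getD (keyOf q) 0) 0), cnt) := by
        simp only [solStepA, keyOf_def, valOf_def]
        rw [if_pos hA]
      rw [hstep, ih]
      have hsum : ((keysOf (q :: rest)).map (fun k =>
          simA (stored.getD k 0) (elem.getD k 0) (arrLen.getD k 0) (numsOf k (q :: rest)))).sum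
          = 0 + ((keysOf rest).map (fun k =>
              simA ((stored.modify (keyOf q) 0 (· + valOf q)).getD k 0)
                ((elem.modify (keyOf q) 0 (· + valOf q)).getD k 0)
                ((arrLen.insert (keyOf q) (powLoopA ((elem.modify (keyOf q) 0 (· + valOf q)).getD (keyOf q) 0) 0)).getD k 0)
                (numsOf k rest))).sum := by
        refine key_sum_step (keyOf q) (keysOf rest) (keysOf (q :: rest)) (nodup_keysOf rest)
          (nodup_keysOf (q :: rest)) _ _ _ (mem_keysOf_cons q rest) ?_ ?_ ?_
        · intro k hk
          rw [numsOf_cons, if_neg (fun h => hk h.symm)]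
          simp [hEmod, hSmod, hAins, hk]
        · rw [numsOf_cons, if_pos rfl]
          simp [simA, hA, hEmod, hSmod, hAins]
        · intro hnm
          rw [numsOf_eq_nil_of_not_mem rest (keyOf q) hnm]
          rfl
      rw [hsum]
      omega
    · by_cases hB : valOf q > arrLen.getD (keyOf q) 0 - stored.getD (keyOf q) 0
      · have hstep : solStepA (stored, elem, arrLen, cnt) q
            = (stored.modify (keyOf q) 0 (· + valOf q), elem.modify (keyOf q) 0 (· + valOf q),
               arrLen.insert (keyOf q) (powLoopA ((elem.modify (keyOf q) 0 (· + valOf q)).getD (keyOf q) 0) 0),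
               cnt + stored.getD (keyOf q) 0) := by
          simp only [solStepA, keyOf_def, valOf_def]
          rw [if_neg hA, if_pos hB]
        rw [hstep, ih]
        have hsum : ((keysOf (q :: rest)).map (fun k =>
            simA (stored.getD k 0) (elem.getD k 0) (arrLen.getD k 0) (numsOf k (q :: rest)))).sum
            = stored.getD (keyOf q) 0 + ((keysOf rest).map (fun k =>
                simA ((stored.modify (keyOf q) 0 (· + valOf q)).getD k 0)
                  ((elem.modify (keyOf q) 0 (· + valOf q)).getD k 0)
                  ((arrLen.insert (keyOf q) (powLoopA ((elem.modify (keyOf q) 0 (· + valOf q)).getD (keyOf q) 0) 0)).getD k 0)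
                  (numsOf k rest))).sum := by
          refine key_sum_step (keyOf q) (keysOf rest) (keysOf (q :: rest)) (nodup_keysOf rest)
            (nodup_keysOf (q :: rest)) _ _ _ (mem_keysOf_cons q rest) ?_ ?_ ?_
          · intro k hk
            rw [numsOf_cons, if_neg (fun h => hk h.symm)]
            simp [hEmod, hSmod, hAins, hk]
          · rw [numsOf_cons, if_pos rfl]
            simp [simA, hA, hB, hEmod, hSmod, hAins]
          · intro hnm
            rw [numsOf_eq_nil_of_not_mem rest (keyOf q) hnm]
            rfl
        rw [hsum]
        omega
      · have hstep : solStepA (stored, elem, arrLen, cnt) q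
            = (stored.modify (keyOf q) 0 (· + valOf q), elem.modify (keyOf q) 0 (· + valOf q),
               arrLen, cnt) := by
          simp only [solStepA, keyOf_def, valOf_def]
          rw [if_neg hA, if_neg hB, if_pos (by omega)]
        rw [hstep, ih]
        have hC : valOf q ≤ arrLen.getD (keyOf q) 0 - stored.getD (keyOf q) 0 := by omega
        have hsum : ((keysOf (q :: rest)).map (fun k =>
            simA (stored.getD k 0) (elem.getD k 0) (arrLen.getD k 0) (numsOf k (q :: rest)))).sum
            = 0 + ((keysOf rest).map (fun k =>
                simA ((stored.modify (keyOf q) 0 (· + valOf q)).getD k 0)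
                  ((elem.modify (keyOf q) 0 (· + valOf q)).getD k 0)
                  (arrLen.getD k 0) (numsOf k rest))).sum := by
          refine key_sum_step (keyOf q) (keysOf rest) (keysOf (q :: rest)) (nodup_keysOf rest)
            (nodup_keysOf (q :: rest)) _ _ _ (mem_keysOf_cons q rest) ?_ ?_ ?_
          · intro k hk
            rw [numsOf_cons, if_neg (fun h => hk h.symm)]
            simp [hEmod, hSmod, hk]
          · rw [numsOf_cons, if_pos rfl]
            simp [simA, hA, hB, hC, hEmod, hSmod]
          · intro hnm
            rw [numsOf_eq_nil_of_not_mem rest (keyOf q) hnm]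
            rfl
        rw [hsum]
        omega

lemma solution_alt_eq (qs : List (List Int)) :
    solution_alt qs = ((keysOf qs).map (fun k => perList (numsOf k qs))).sum := by
  have key : solution_alt qs
      = ((qs.map (fun q => (keyOf q, valOf q))).foldl
          (fun d p => d.modify p.1 [] (· ++ [p.2])) PySem.Dict.empty).values.foldl
          (fun answer nums => answer + perList nums) 0 := by
    simp only [solution_alt, List.foldl_map]
    rfl
  have hkeys : ((qs.map (fun q => (keyOf q, valOf q))).foldl
      (fun d p => d.modify p.1 [] (· ++ [p.2])) PySem.Dict.empty).keys = keysOf qs := by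
    have := PySem.Dict.keys_foldl_modify_key (qs.map (fun q => (keyOf q, valOf q)))
      (fun p => p.1) [] (fun _ p => (· ++ [p.2])) PySem.Dict.empty
    simpa [keysOf, PySem.Set.update_nil_left, List.map_map, Function.comp, keyOf] using this
  have hnodup : ((qs.map (fun q => (keyOf q, valOf q))).foldl
      (fun d p => d.modify p.1 [] (· ++ [p.2])) PySem.Dict.empty).keys.Nodup := by
    rw [hkeys]; exact nodup_keysOf qs
  have hgetD : ∀ k, ((qs.map (fun q => (keyOf q, valOf q))).foldl
      (fun d p => d.modify p.1 [] (· ++ [p.2])) PySem.Dict.empty).getD k [] = numsOf k qs := by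
    intro k
    rw [PySem.Dict.getD_foldl_modify_append]
    simp only [PySem.Dict.getD_empty, List.nil_append, List.filter_map]
    rw [List.map_map]
    rfl
  rw [key, PySem.Dict.values_eq_map_keys _ hnodup ([] : List Int), hkeys,
    PySem.List.foldl_add, List.map_map]
  simp only [zero_add]
  apply congrArg
  apply List.map_congr_left
  intro k _
  simp only [Function.comp_apply]
  rw [hgetD]

-- ===== VERDICT (by name: the statement is the Claim_ definition above) =====
theorem solution_spec : Claim_equal_solution := by
  intro qs _ _
  unfold Spec_solution solution
  rw [PySem.List.foldl_pyRange_zero_pyGetD qs [] solStepA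
      (PySem.Dict.empty, PySem.Dict.empty, PySem.Dict.empty, (0:Int))]
  rw [foldA_main, solution_alt_eq]
  simp [PySem.Dict.getD_empty, perList_eq_simA]
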